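-- pv_equiv track=rewrite | github.com/EurekaIdeaUser/csv_filter | keywords.py | create_mw_kw_map
-- ===== SOURCE A (Python) =====
-- def create_mw_kw_map(kw_list):
-- 	mw_kws = list(filter(lambda kw: len(kw.split(' ')) > 1, kw_list))
-- 	mw_map = {}
-- 	for kw in mw_kws:
-- 		kwl = kw.split(' ')
-- 		key = kwl[0]
-- 		# rest_l = kwl[1:]
-- 		# rest_s = ' '.join(rest_l)
-- 		rest_s = set(kwl)
-- 		if key in mw_map:
-- 			mw_map[key].append(rest_s)
-- 		else:
-- 			mw_map[key] = [rest_s]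
-- 	return mw_map
-- ===== SOURCE B (Python) =====
-- def create_mw_kw_map(kw_list):
-- 	multi = [kwl for kwl in (kw.split(' ') for kw in kw_list) if len(kwl) > 1]
-- 	keys = dict.fromkeys(kwl[0] for kwl in multi)
-- 	return {k: [set(kwl) for kwl in multi if kwl[0] == k] for k in keys}
-- ===== Notes on version B (the rewrite author's own statement) =====
-- stated objective: simpler
-- what changed: Instead of bucketing into a dict with a contains/append/overwrite loop, B splits once, deduplicates the first words with dict.fromkeys, and builds the result as one dict comprehension that collects each key's word-sets by a filtering comprehension.
import Mathlib
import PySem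

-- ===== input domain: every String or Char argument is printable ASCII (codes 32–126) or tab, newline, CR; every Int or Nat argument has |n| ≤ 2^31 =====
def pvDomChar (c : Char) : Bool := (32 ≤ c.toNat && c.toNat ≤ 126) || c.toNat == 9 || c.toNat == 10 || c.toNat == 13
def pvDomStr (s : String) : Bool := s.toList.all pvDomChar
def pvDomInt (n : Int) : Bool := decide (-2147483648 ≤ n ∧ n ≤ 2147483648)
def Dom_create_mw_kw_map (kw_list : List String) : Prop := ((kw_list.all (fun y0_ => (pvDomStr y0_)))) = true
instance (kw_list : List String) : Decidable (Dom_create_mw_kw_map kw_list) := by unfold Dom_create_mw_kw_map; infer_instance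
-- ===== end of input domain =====

-- B replaces A's dict-bucketing loop (contains/append/overwrite) by: dedup the first
-- words, then one comprehension collecting each key's word-sets by filtering; not faster.

-- kw.split(' '): the separator " " is nonempty, so PySem.Str.split? is always `some` (exact)
def pvSplitSpace (kw : String) : List String := (PySem.Str.split? kw " ").getD []

-- ===== PORT A =====
def create_mw_kw_map (kw_list : List String) : List (String × List (List String)) :=
  let mw_kws := kw_list.filter (fun kw => (pvSplitSpace kw).length > 1)
  let mw_map := mw_kws.foldl
    (fun mw_map kw =>
      let kwl := pvSplitSpace kw
      let key := PySem.List.pyGetD kwl 0 ""   -- kwl[0]; split(' ') never returns an empty list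
      let rest_s := PySem.Set.ofList kwl
      if mw_map.contains key then
        mw_map.insert key (mw_map.getD key [] ++ [rest_s])
      else
        mw_map.insert key [rest_s])
    (PySem.Dict.empty : PySem.Dict String (List (List String)))
  mw_map.items

-- ===== PORT B =====
def create_mw_kw_map_alt (kw_list : List String) : List (String × List (List String)) :=
  let multi := (kw_list.map pvSplitSpace).filter (fun kwl => kwl.length > 1)
  let keys := PySem.List.dedup (multi.map (fun kwl => PySem.List.pyGetD kwl 0 ""))
  keys.map (fun k =>
    (k, (multi.filter (fun kwl => PySem.List.pyGetD kwl 0 "" == k)).map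
          (fun kwl => PySem.Set.ofList kwl)))

-- ===== PRECONDITION & SPEC =====
def Spec_create_mw_kw_map (kw_list : List String) (out : List (String × List (List String))) : Prop := out = create_mw_kw_map_alt kw_list
instance (kw_list : List String) (out : List (String × List (List String))) : Decidable (Spec_create_mw_kw_map kw_list out) := by unfold Spec_create_mw_kw_map; infer_instance

-- ===== CLAIM (what is proved, stated in full; the proofs are below) =====
def Claim_equal_create_mw_kw_map : Prop := ∀ (kw_list : List String), Dom_create_mw_kw_map kw_list → Spec_create_mw_kw_map kw_list (create_mw_kw_map kw_list)

-- ===== LEMMAS AND PROOFS =====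

-- A's if/contains/append step is exactly Dict.modify with default [] and append
theorem pv_step_eq_modify (m : PySem.Dict String (List (List String)))
    (key : String) (r : List String) :
    (if m.contains key then m.insert key (m.getD key [] ++ [PySem.Set.ofList r])
     else m.insert key [PySem.Set.ofList r])
      = m.modify key [] (fun v => v ++ [PySem.Set.ofList r]) := by
  unfold PySem.Dict.modify
  by_cases h : m.contains key = true
  · simp [h]
  · have hg : m.get? key = none := by
      rw [PySem.Dict.get?_eq_none_iff_contains]
      simpa using h
    simp [h, PySem.Dict.getD, hg]

-- the bucketing fold over any list of split keyword lists, characterised key-by-key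
theorem pv_fold_items (M : List (List String)) :
    ((M.foldl (fun d kwl =>
        d.modify (PySem.List.pyGetD kwl 0 "") [] (fun v => v ++ [PySem.Set.ofList kwl]))
      (PySem.Dict.empty : PySem.Dict String (List (List String)))).items)
    = (PySem.List.dedup (M.map (fun kwl => PySem.List.pyGetD kwl 0 ""))).map (fun k =>
        (k, (M.filter (fun kwl => PySem.List.pyGetD kwl 0 "" == k)).map
              (fun kwl => PySem.Set.ofList kwl))) := by
  set fw : List String → String := fun kwl => PySem.List.pyGetD kwl 0 "" with hfw
  set d := M.foldl (fun d kwl =>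
      d.modify (fw kwl) [] (fun v => v ++ [PySem.Set.ofList kwl]))
    (PySem.Dict.empty : PySem.Dict String (List (List String))) with hd
  have hnd : d.keys.Nodup := by
    rw [hd]
    exact PySem.Dict.nodup_keys_foldl_modify_key M fw []
      (fun _ kwl => fun v => v ++ [PySem.Set.ofList kwl]) _ (by simp [PySem.Dict.empty])
  have hkeys : d.keys = PySem.List.dedup (M.map fw) := by
    rw [hd]
    rw [PySem.Dict.keys_foldl_modify_key M fw []
      (fun _ kwl => fun v => v ++ [PySem.Set.ofList kwl])]
    simp [PySem.Dict.empty, PySem.Set.update_nil_left]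
  have hget : ∀ k, d.getD k []
      = (M.filter (fun kwl => fw kwl == k)).map (fun kwl => PySem.Set.ofList kwl) := by
    intro k
    have hpair : d = (M.map (fun kwl => (fw kwl, PySem.Set.ofList kwl))).foldl
        (fun d p => d.modify p.1 [] (fun v => v ++ [p.2]))
        (PySem.Dict.empty : PySem.Dict String (List (List String))) := by
      rw [hd, List.foldl_map]
    rw [hpair, PySem.Dict.getD_foldl_modify_append]
    simp [PySem.Dict.empty, PySem.Dict.getD, PySem.Dict.get?, List.filter_map, Function.comp_def]
  rw [PySem.Dict.items_eq_map_keys d hnd [], hkeys]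
  refine List.map_congr_left ?_
  intro k _
  rw [hget k]

theorem create_mw_kw_map_eq :
    ∀ kw_list, create_mw_kw_map kw_list = create_mw_kw_map_alt kw_list := by
  intro kw_list
  unfold create_mw_kw_map create_mw_kw_map_alt
  have hmulti : (kw_list.map pvSplitSpace).filter (fun kwl => kwl.length > 1)
      = (kw_list.filter (fun kw => (pvSplitSpace kw).length > 1)).map pvSplitSpace := by
    rw [List.filter_map]
    rfl
  rw [hmulti]
  set L := kw_list.filter (fun kw => (pvSplitSpace kw).length > 1) with hL
  have hfold : L.foldl
      (fun mw_map kw =>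
        let kwl := pvSplitSpace kw
        let key := PySem.List.pyGetD kwl 0 ""
        let rest_s := PySem.Set.ofList kwl
        if mw_map.contains key then
          mw_map.insert key (mw_map.getD key [] ++ [rest_s])
        else
          mw_map.insert key [rest_s])
      (PySem.Dict.empty : PySem.Dict String (List (List String)))
    = (L.map pvSplitSpace).foldl (fun d kwl =>
        d.modify (PySem.List.pyGetD kwl 0 "") [] (fun v => v ++ [PySem.Set.ofList kwl]))
      (PySem.Dict.empty : PySem.Dict String (List (List String))) := by
    rw [List.foldl_map]
    have hstep : (fun (mw_map : PySem.Dict String (List (List String))) kw =>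
        let kwl := pvSplitSpace kw
        let key := PySem.List.pyGetD kwl 0 ""
        let rest_s := PySem.Set.ofList kwl
        if mw_map.contains key then
          mw_map.insert key (mw_map.getD key [] ++ [rest_s])
        else
          mw_map.insert key [rest_s])
      = (fun (d : PySem.Dict String (List (List String))) kw =>
          d.modify (PySem.List.pyGetD (pvSplitSpace kw) 0 "") []
            (fun v => v ++ [PySem.Set.ofList (pvSplitSpace kw)])) := by
      funext m kw
      exact pv_step_eq_modify m (PySem.List.pyGetD (pvSplitSpace kw) 0 "") (pvSplitSpace kw)
    rw [hstep]
  simp only [hfold, pv_fold_items]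

-- ===== VERDICT (by name: the statement is the Claim_ definition above) =====
theorem create_mw_kw_map_spec : Claim_equal_create_mw_kw_map := by
  intro kw_list _
  unfold Spec_create_mw_kw_map
  exact create_mw_kw_map_eq kw_list
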